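-- pv_equiv track=rewrite | github.com/AgHarsh/Autonomous-Path-Mapping-Robot | Codes 9x9/jail_manage.py | jails
-- ===== SOURCE A (Python) =====
-- def jails(n, jail, death_e):
--     jail_pos = []
--     for i in range(n):
--         for j in range(n):
--             if jail[i][j] == 1:
--                 jail_pos.append(n * i + j)
--     for i in range(n):
--         for j in range(n):
--             if jail[i][j] == 10:
--                 jail_pos.append(n * i + j)
--     return jail_pos
-- ===== SOURCE B (Python) =====
-- def jails(n, jail, death_e):
--     buckets = {}
--     for i in range(n):
--         for j in range(n):
--             v = jail[i][j]
--             buckets[v] = buckets.get(v, []) + [n * i + j]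
--     return buckets.get(1, []) + buckets.get(10, [])
-- ===== Notes on version B (the rewrite author's own statement) =====
-- stated objective: simpler
-- what changed: One traversal of the grid grouping positions into a value-keyed dict of lists, then returning bucket 1 followed by bucket 10, instead of two separate full scans of the grid.
import Mathlib
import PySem

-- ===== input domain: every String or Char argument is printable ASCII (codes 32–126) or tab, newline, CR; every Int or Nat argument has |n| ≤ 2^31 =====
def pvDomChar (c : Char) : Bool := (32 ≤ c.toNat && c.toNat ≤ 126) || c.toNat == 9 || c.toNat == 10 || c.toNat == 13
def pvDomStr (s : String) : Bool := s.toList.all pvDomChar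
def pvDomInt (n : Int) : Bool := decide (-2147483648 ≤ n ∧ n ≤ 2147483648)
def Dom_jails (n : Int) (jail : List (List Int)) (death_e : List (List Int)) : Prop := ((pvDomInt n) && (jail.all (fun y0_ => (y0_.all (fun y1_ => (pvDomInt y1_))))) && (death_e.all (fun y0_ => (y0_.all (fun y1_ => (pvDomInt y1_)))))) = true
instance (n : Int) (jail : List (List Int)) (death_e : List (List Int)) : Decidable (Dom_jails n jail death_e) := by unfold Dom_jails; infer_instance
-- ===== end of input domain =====

-- B replaces A's two separate full scans of the grid by a single traversal that groups
-- positions into a value-keyed dict of lists and then concatenates bucket 1 and bucket 10 (objective: simpler).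

-- ===== PORT A =====
-- two nested-loop passes over the grid: first collecting positions of value 1, then of value 10
def jails (n : Int) (jail : List (List Int)) (death_e : List (List Int)) : List Int :=
  let l1 := (PySem.List.pyRange 0 n 1).foldl (fun acc i =>
    (PySem.List.pyRange 0 n 1).foldl (fun acc j =>
      if PySem.List.pyGetD (PySem.List.pyGetD jail i []) j 0 == 1 then acc ++ [n * i + j] else acc) acc) []
  (PySem.List.pyRange 0 n 1).foldl (fun acc i =>
    (PySem.List.pyRange 0 n 1).foldl (fun acc j =>
      if PySem.List.pyGetD (PySem.List.pyGetD jail i []) j 0 == 10 then acc ++ [n * i + j] else acc) acc) l1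

-- ===== PORT B =====
-- one traversal: buckets[v] = buckets.get(v, []) + [n*i+j]  (= Dict.modify), then bucket 1 ++ bucket 10
def jails_alt (n : Int) (jail : List (List Int)) (death_e : List (List Int)) : List Int :=
  let buckets := (PySem.List.pyRange 0 n 1).foldl (fun d i =>
    (PySem.List.pyRange 0 n 1).foldl (fun d j =>
      PySem.Dict.modify d (PySem.List.pyGetD (PySem.List.pyGetD jail i []) j 0) [] (· ++ [n * i + j])) d)
    PySem.Dict.empty
  buckets.getD 1 [] ++ buckets.getD 10 []

-- ===== PRECONDITION & SPEC =====
-- Pre_ excludes exactly the inputs where A raises IndexError: jail must have at least n rows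
-- and each of the first n rows at least n entries.
def Pre_jails (n : Int) (jail : List (List Int)) (death_e : List (List Int)) : Prop :=
  (jail.take n.toNat).length = n.toNat ∧ ∀ row ∈ jail.take n.toNat, n ≤ (row.length : Int)
instance (n : Int) (jail : List (List Int)) (death_e : List (List Int)) : Decidable (Pre_jails n jail death_e) := by unfold Pre_jails; infer_instance
def pvWitness_jails : Int × List (List Int) × List (List Int) := (2, [[1, 0], [0, 10]], [])

def Spec_jails (n : Int) (jail : List (List Int)) (death_e : List (List Int)) (out : List Int) : Prop := out = jails_alt n jail death_e
instance (n : Int) (jail : List (List Int)) (death_e : List (List Int)) (out : List Int) : Decidable (Spec_jails n jail death_e out) := by unfold Spec_jails; infer_instance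

-- ===== CLAIM (what is proved, stated in full; the proofs are below) =====
def Claim_equal_jails : Prop := ∀ (n : Int) (jail : List (List Int)) (death_e : List (List Int)), Dom_jails n jail death_e → Pre_jails n jail death_e → Spec_jails n jail death_e (jails n jail death_e)

-- ===== LEMMAS AND PROOFS =====

-- A's collect-loop for a value c equals the filtered-and-projected flattened cell list
theorem jails_loopA (n : Int) (g : Int → Int → Int) (c : Int) (acc : List Int) :
    (PySem.List.pyRange 0 n 1).foldl (fun acc i =>
      (PySem.List.pyRange 0 n 1).foldl (fun acc j =>
        if g i j == c then acc ++ [n * i + j] else acc) acc) acc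
    = acc ++ (((PySem.List.pyRange 0 n 1).flatMap (fun i =>
        (PySem.List.pyRange 0 n 1).map (fun j => (g i j, n * i + j)))).filter
        (fun p => p.1 == c)).map (·.2) := by
  rw [← PySem.List.foldl_append_if (fun p : Int × Int => p.1 == c) (·.2)]
  simp [List.foldl_flatMap, List.foldl_map]

-- B's nested dict loop equals the grouping fold over the flattened cell list
theorem jails_loopB (n : Int) (g : Int → Int → Int) :
    (PySem.List.pyRange 0 n 1).foldl (fun d i =>
      (PySem.List.pyRange 0 n 1).foldl (fun d j =>
        PySem.Dict.modify d (g i j) [] (· ++ [n * i + j])) d) PySem.Dict.empty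
    = ((PySem.List.pyRange 0 n 1).flatMap (fun i =>
        (PySem.List.pyRange 0 n 1).map (fun j => (g i j, n * i + j)))).foldl
        (fun d p => PySem.Dict.modify d p.1 [] (· ++ [p.2])) PySem.Dict.empty := by
  simp [List.foldl_flatMap, List.foldl_map]

-- ===== VERDICT (by name: the statement is the Claim_ definition above) =====
theorem jails_spec : Claim_equal_jails := by
  intro n jail death_e _ _
  unfold Spec_jails jails jails_alt
  simp only [jails_loopB, PySem.Dict.getD_foldl_modify_append, jails_loopA,
    PySem.Dict.getD_empty, List.nil_append]
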